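-- pv_equiv track=rewrite | github.com/arthurpcidrao/Python | fundamentals/Truth table logic math.py | letras_duplicadas
-- ===== SOURCE A (Python) =====
-- alphabet = "abcdefghijklmnopqrstuwxyzABCDEFGHIJKLMNOPQRSTUWXYZ"
--
-- def letras_duplicadas(equation):
--     test = True
--     i = 0
--     while (i < len(equation) - 1):
--         j = 0
--         while (j < len(alphabet)):
--             k = 0
--             while(k < len(alphabet)):
--                 if (equation[i] == alphabet[j] and equation[i+1] == alphabet[k]):
--                     test = False
--                 k = k + 1
--             j = j + 1
--         i = i + 1
--
--     return test
-- ===== SOURCE B (Python) =====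
-- alphabet = "abcdefghijklmnopqrstuwxyzABCDEFGHIJKLMNOPQRSTUWXYZ"
--
-- def letras_duplicadas(equation):
--     # Run-length formulation: the longest run of consecutive alphabet
--     # characters has length >= 2 exactly when some adjacent pair is letters.
--     longest = 0
--     run = 0
--     for ch in equation:
--         if ch in alphabet:
--             run = run + 1
--             if run > longest:
--                 longest = run
--         else:
--             run = 0
--     return longest < 2
-- ===== Notes on version B (the rewrite author's own statement) =====
-- stated objective: faster
-- what changed: B replaces A's pairwise test (for every adjacent position, a full double scan of the 51-char alphabet) by a single pass that tracks the length of the current and longest run of alphabet characters and returns whether the longest run is < 2.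
import Mathlib
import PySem

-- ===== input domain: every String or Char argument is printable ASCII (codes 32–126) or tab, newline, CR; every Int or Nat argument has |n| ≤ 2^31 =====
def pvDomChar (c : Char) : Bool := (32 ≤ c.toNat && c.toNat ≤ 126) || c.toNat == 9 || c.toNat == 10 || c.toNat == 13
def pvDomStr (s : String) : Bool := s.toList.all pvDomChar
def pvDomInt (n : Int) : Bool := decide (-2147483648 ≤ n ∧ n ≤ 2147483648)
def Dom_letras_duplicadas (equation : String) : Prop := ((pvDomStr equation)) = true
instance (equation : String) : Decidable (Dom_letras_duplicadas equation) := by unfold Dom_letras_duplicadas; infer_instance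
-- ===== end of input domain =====

-- B replaces A's triple nested index loops by a one-pass run-length scan (objective: faster, constant factor).

-- the module-level constant 'alphabet' (note: no 'v'/'V')
def pvAlphabet : List Char := "abcdefghijklmnopqrstuwxyzABCDEFGHIJKLMNOPQRSTUWXYZ".toList

-- ===== PORT A =====
-- literal transliteration of the three while-loops over indices i, j, k
def letras_duplicadas (equation : String) : Bool :=
  let eq := equation.toList
  (PySem.List.pyRange 0 ((eq.length : Int) - 1) 1).foldl (fun test i =>
    (PySem.List.pyRange 0 (pvAlphabet.length : Int) 1).foldl (fun test j =>
      (PySem.List.pyRange 0 (pvAlphabet.length : Int) 1).foldl (fun test k =>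
        if PySem.List.pyGet? eq i = PySem.List.pyGet? pvAlphabet j ∧
           PySem.List.pyGet? eq (i + 1) = PySem.List.pyGet? pvAlphabet k
        then false else test) test) test) true

-- ===== PORT B =====
-- one pass tracking (longest, run): run = current run of alphabet chars, longest = its maximum
def letras_duplicadas_alt (equation : String) : Bool :=
  let st := equation.toList.foldl (fun (p : Int × Int) ch =>
    if pvAlphabet.contains ch then
      let run := p.2 + 1
      (if run > p.1 then run else p.1, run)
    else (p.1, 0)) (0, 0)
  st.1 < 2

-- ===== PRECONDITION & SPEC =====
def Spec_letras_duplicadas (equation : String) (out : Bool) : Prop := out = letras_duplicadas_alt equation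
instance (equation : String) (out : Bool) : Decidable (Spec_letras_duplicadas equation out) := by unfold Spec_letras_duplicadas; infer_instance

-- ===== CLAIM (what is proved, stated in full; the proofs are below) =====
def Claim_equal_letras_duplicadas : Prop := ∀ (equation : String), Dom_letras_duplicadas equation → Spec_letras_duplicadas equation (letras_duplicadas equation)

-- ===== LEMMAS AND PROOFS =====

-- 'some c is in the alphabet, none is not' — the content of one full alphabet scan
def pvHit (oc : Option Char) : Bool :=
  match oc with
  | some c => pvAlphabet.contains c
  | none => false

-- 'is the first character (if any) a letter'
def pvFirstLetter (l : List Char) : Bool :=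
  match l with
  | [] => false
  | c :: _ => pvAlphabet.contains c

-- 'some adjacent pair of letters exists'
def pvPairs : List Char → Bool
  | [] => false
  | c :: t => (pvAlphabet.contains c && pvFirstLetter t) || pvPairs t

-- a 'set the flag to false on a hit' loop is an 'any'
theorem pv_foldl_flag {α : Type} (p : α → Prop) [DecidablePred p] (l : List α) (t : Bool) :
    l.foldl (fun t x => if p x then false else t) t = (t && !(l.any fun x => decide (p x))) := by
  induction l generalizing t with
  | nil => simp
  | cons x xs ih =>
    simp only [List.foldl_cons, List.any_cons, ih]
    by_cases h : p x <;> cases t <;> simp [h]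

-- an 'and the flag with each step' loop is an 'any'
theorem pv_foldl_band {α : Type} (f : α → Bool) (l : List α) (t : Bool) :
    l.foldl (fun t x => t && !(f x)) t = (t && !(l.any f)) := by
  induction l generalizing t with
  | nil => simp
  | cons x xs ih =>
    simp only [List.foldl_cons, List.any_cons, ih]
    cases f x <;> cases t <;> simp

theorem pv_any_and_const {α : Type} (f : α → Bool) (c : Bool) (l : List α) :
    l.any (fun x => f x && c) = (l.any f && c) := by
  induction l with
  | nil => simp
  | cons x xs ih => cases c <;> simp_all

theorem pv_any_const_and {α : Type} (f : α → Bool) (c : Bool) (l : List α) :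
    l.any (fun x => c && f x) = (c && l.any f) := by
  induction l with
  | nil => simp
  | cons x xs ih => cases c <;> simp_all

-- scanning all indices of a list for an equality hit is membership
theorem pv_any_index_mem (c : Char) (l : List Char) :
    (PySem.List.pyRange 0 (l.length : Int) 1).any
      (fun j => decide (some c = PySem.List.pyGet? l j)) = l.contains c := by
  rcases Bool.eq_false_or_eq_true (l.contains c) with h | h <;> rw [h]
  · rw [List.any_eq_true]
    simp only [List.contains_eq_mem, decide_eq_true_eq] at h
    obtain ⟨j, hj, hje⟩ := List.mem_iff_getElem.mp h
    refine ⟨(j : Int), ?_, ?_⟩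
    · rw [PySem.List.mem_pyRange_one]; constructor <;> [positivity; exact_mod_cast hj]
    · simp [hj, hje]
  · rw [List.any_eq_false]
    intro j hj
    rw [PySem.List.mem_pyRange_one] at hj
    simp only [decide_eq_true_eq]
    intro heq
    have := PySem.List.mem_of_pyGet?_eq_some l heq.symm
    simp [List.contains_eq_mem] at h
    exact h this

-- one full alphabet scan computes pvHit
theorem pv_any_alpha (oc : Option Char) :
    (PySem.List.pyRange 0 (pvAlphabet.length : Int) 1).any
      (fun k => decide (oc = PySem.List.pyGet? pvAlphabet k)) = pvHit oc := by
  cases oc with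
  | some c => rw [pv_any_index_mem]; rfl
  | none =>
    simp only [pvHit]
    rw [List.any_eq_false]
    intro j hj
    rw [PySem.List.mem_pyRange_one] at hj
    simp only [decide_eq_true_eq]
    intro heq
    rw [PySem.List.pyGet?_eq_some_getElem pvAlphabet hj.1 hj.2] at heq
    simp at heq

-- A's triple loop, characterised as one 'any' over adjacent positions
theorem letras_eq_any (equation : String) :
    letras_duplicadas equation =
      !((PySem.List.pyRange 0 ((equation.toList.length : Int) - 1) 1).any
          (fun i => pvHit (PySem.List.pyGet? equation.toList i) &&
                    pvHit (PySem.List.pyGet? equation.toList (i + 1)))) := by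
  unfold letras_duplicadas
  have hinner : ∀ (t : Bool) (oc od : Option Char),
      (PySem.List.pyRange 0 (pvAlphabet.length : Int) 1).foldl (fun t j =>
        (PySem.List.pyRange 0 (pvAlphabet.length : Int) 1).foldl (fun t k =>
          if oc = PySem.List.pyGet? pvAlphabet j ∧ od = PySem.List.pyGet? pvAlphabet k
          then false else t) t) t
      = (t && !(pvHit oc && pvHit od)) := by
    intro t oc od
    have hk : ∀ (t : Bool) (j : Int),
        (PySem.List.pyRange 0 (pvAlphabet.length : Int) 1).foldl (fun t k =>
          if oc = PySem.List.pyGet? pvAlphabet j ∧ od = PySem.List.pyGet? pvAlphabet k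
          then false else t) t
        = (t && !(decide (oc = PySem.List.pyGet? pvAlphabet j) && pvHit od)) := by
      intro t j
      rw [pv_foldl_flag (fun k => oc = PySem.List.pyGet? pvAlphabet j ∧
            od = PySem.List.pyGet? pvAlphabet k)]
      have dand : ∀ k : Int,
          decide (oc = PySem.List.pyGet? pvAlphabet j ∧ od = PySem.List.pyGet? pvAlphabet k)
            = (decide (oc = PySem.List.pyGet? pvAlphabet j) &&
               decide (od = PySem.List.pyGet? pvAlphabet k)) := fun k => by simp
      simp only [dand]
      rw [pv_any_const_and, pv_any_alpha]
    simp only [hk]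
    rw [pv_foldl_band, pv_any_and_const, pv_any_alpha]
  simp only [hinner]
  rw [pv_foldl_band]
  simp

-- the indexed hit predicate as a getElem statement, for nonnegative index m with m+1 in range
theorem pv_hit_pair_nat (l : List Char) (m : Nat) (hm : m + 1 < l.length) :
    (pvHit (PySem.List.pyGet? l (m : Int)) && pvHit (PySem.List.pyGet? l ((m : Int) + 1)))
      = (pvAlphabet.contains l[m] && pvAlphabet.contains l[m + 1]) := by
  rw [PySem.List.pyGet?_eq_some_getElem l (by positivity) (by exact_mod_cast Nat.lt_of_succ_lt hm),
      show ((m : Int) + 1) = ((m + 1 : Nat) : Int) by push_cast; ring,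
      PySem.List.pyGet?_eq_some_getElem l (by positivity) (by exact_mod_cast hm)]
  simp [pvHit]

-- the 'any over adjacent index pairs' is the recursive pvPairs
theorem pv_any_range_eq_pairs (l : List Char) :
    (PySem.List.pyRange 0 ((l.length : Int) - 1) 1).any
        (fun i => pvHit (PySem.List.pyGet? l i) && pvHit (PySem.List.pyGet? l (i + 1)))
      = pvPairs l := by
  rw [Bool.eq_iff_iff, List.any_eq_true]
  constructor
  · rintro ⟨i, hi, hif⟩
    rw [PySem.List.mem_pyRange_one] at hi
    obtain ⟨m, rfl⟩ : ∃ m : Nat, i = (m : Int) := ⟨i.toNat, by omega⟩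
    have hm : m + 1 < l.length := by
      have := hi.2; omega
    rw [pv_hit_pair_nat l m hm] at hif
    clear hi
    induction l generalizing m with
    | nil => simp at hm
    | cons c t ih =>
      cases m with
      | zero =>
        cases t with
        | nil => simp at hm
        | cons d u =>
          simp only [List.getElem_cons_zero, List.getElem_cons_succ] at hif
          simp only [pvPairs, pvFirstLetter, Bool.or_eq_true]
          exact Or.inl (by simpa using hif)
      | succ m' =>
        have := ih m' (by simpa using hm) (by simpa using hif)
        simp [pvPairs, this]
  · intro hp
    induction l with
    | nil => simp [pvPairs] at hp
    | cons c t ih =>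
      simp only [pvPairs, Bool.or_eq_true, Bool.and_eq_true] at hp
      rcases hp with ⟨hc, hf⟩ | hp
      · cases t with
        | nil => simp [pvFirstLetter] at hf
        | cons d u =>
          refine ⟨0, ?_, ?_⟩
          · rw [PySem.List.mem_pyRange_one]
            refine ⟨le_rfl, ?_⟩
            simp only [List.length_cons]
            push_cast
            omega
          · rw [show (0 : Int) = ((0 : Nat) : Int) by norm_num,
                pv_hit_pair_nat _ 0 (by simp)]
            simp only [List.getElem_cons_zero, List.getElem_cons_succ]
            cases u <;> simp_all [pvFirstLetter]
      · obtain ⟨i, hi, hif⟩ := ih hp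
        rw [PySem.List.mem_pyRange_one] at hi
        obtain ⟨m, rfl⟩ : ∃ m : Nat, i = (m : Int) := ⟨i.toNat, by omega⟩
        have hm : m + 1 < t.length := by
          have := hi.2; omega
        rw [pv_hit_pair_nat t m hm] at hif
        refine ⟨((m + 1 : Nat) : Int), ?_, ?_⟩
        · rw [PySem.List.mem_pyRange_one]
          refine ⟨by positivity, ?_⟩
          simp only [List.length_cons]
          push_cast
          omega
        · rw [pv_hit_pair_nat (c :: t) (m + 1) (by simpa using Nat.succ_lt_succ hm)]
          simpa using hif

-- B's fold invariant: starting from (g, r) with 0 ≤ r ≤ g, the final 'longest' is ≥ 2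
-- iff it already was, or the pending run extends into a leading letter, or a pair exists
theorem pv_fold_invariant (l : List Char) : ∀ (g r : Int), 0 ≤ r → r ≤ g →
    ((2 ≤ (l.foldl (fun (p : Int × Int) ch =>
        if pvAlphabet.contains ch then
          (if p.2 + 1 > p.1 then p.2 + 1 else p.1, p.2 + 1)
        else (p.1, 0)) (g, r)).1) ↔
      (2 ≤ g ∨ (1 ≤ r ∧ pvFirstLetter l = true) ∨ pvPairs l = true)) := by
  induction l with
  | nil => intro g r _ _; simp [pvFirstLetter, pvPairs]
  | cons c t ih =>
    intro g r hr hrg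
    rcases Bool.eq_false_or_eq_true (pvAlphabet.contains c) with hc | hc
    · rw [List.foldl_cons, if_pos hc]
      rw [ih (if r + 1 > g then r + 1 else g) (r + 1) (by omega) (by split <;> omega)]
      simp only [pvFirstLetter, pvPairs, hc, Bool.true_and, Bool.or_eq_true]
      constructor
      · rintro (hg | ⟨_, hf⟩ | hp)
        · by_cases h2 : 2 ≤ g
          · exact Or.inl h2
          · split at hg
            · refine Or.inr (Or.inl ⟨by omega, ?_⟩)
              simp
            · exact Or.inl hg
        · exact Or.inr (Or.inr (Or.inl hf))
        · exact Or.inr (Or.inr (Or.inr hp))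
      · rintro (hg | ⟨_, _⟩ | hf | hp)
        · exact Or.inl (by split <;> omega)
        · exact Or.inl (by split <;> omega)
        · exact Or.inr (Or.inl ⟨by omega, hf⟩)
        · exact Or.inr (Or.inr hp)
    · rw [List.foldl_cons, if_neg (by simpa using hc)]
      rw [ih g 0 le_rfl (by omega)]
      simp only [pvFirstLetter, pvPairs, hc, Bool.false_and, Bool.false_or]
      constructor
      · rintro (hg | ⟨h1, _⟩ | hp)
        · exact Or.inl hg
        · omega
        · exact Or.inr (Or.inr hp)
      · rintro (hg | ⟨_, hf⟩ | hp)
        · exact Or.inl hg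
        · exact absurd hf (by simp)
        · exact Or.inr (Or.inr hp)

-- B computes !pvPairs
theorem letras_alt_eq_pairs (equation : String) :
    letras_duplicadas_alt equation = !(pvPairs equation.toList) := by
  have efun : (fun (p : Int × Int) ch =>
      if pvAlphabet.contains ch then
        let run := p.2 + 1
        (if run > p.1 then run else p.1, run)
      else (p.1, 0)) = (fun (p : Int × Int) ch =>
      if pvAlphabet.contains ch then
        (if p.2 + 1 > p.1 then p.2 + 1 else p.1, p.2 + 1)
      else (p.1, 0)) := rfl
  show decide (2 > _) = _
  rw [efun]
  have h := pv_fold_invariant equation.toList 0 0 le_rfl le_rfl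
  by_cases hp : pvPairs equation.toList = true
  · rw [hp, Bool.not_true, decide_eq_false_iff_not]
    have := h.mpr (Or.inr (Or.inr hp))
    omega
  · rw [Bool.not_eq_true] at hp
    rw [hp, Bool.not_false, decide_eq_true_eq]
    by_contra hh
    rcases h.mp (by omega) with h3 | ⟨h3, _⟩ | h3
    · omega
    · omega
    · rw [hp] at h3; exact Bool.false_ne_true h3

-- ===== VERDICT (by name: the statement is the Claim_ definition above) =====
theorem letras_duplicadas_spec : Claim_equal_letras_duplicadas := by
  intro equation _
  unfold Spec_letras_duplicadas
  rw [letras_eq_any, pv_any_range_eq_pairs, letras_alt_eq_pairs]
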